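-- pv_equiv track=rewrite | github.com/OPAYA/Python_Algorithm | Data Structure/Graph/DFS.py | dfs
-- ===== SOURCE A (Python) =====
-- def dfs(graph, start_node):
-- 	visit = {}
-- 	stack = []
--
-- 	stack.append(start_node)
--
-- 	while stack:
-- 		node = stack.pop()
-- 		if node not in visit:
-- 			visit[node] = True
-- 			stack.extend(graph[node])
-- 	return visit
-- ===== SOURCE B (Python) =====
-- def dfs(graph, start_node):
--     # Recursive DFS: mark node, then recurse on neighbors in reversed order
--     # (mirrors the order A's LIFO stack pops them), so the dict insertion
--     # order is identical to A's.
--     visit = {}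
--
--     def helper(node):
--         if node in visit:
--             return
--         visit[node] = True
--         for m in reversed(graph[node]):
--             helper(m)
--
--     helper(start_node)
--     return visit
-- ===== Notes on version B (the rewrite author's own statement) =====
-- stated objective: alternative
-- what changed: A's explicit worklist stack is replaced by genuine recursion: an inner helper marks a node and recursively descends into its neighbors in reversed order (matching the order A's LIFO stack pops them), so no stack data structure is maintained at all.
-- outside the precondition, e.g. on dfs({0: [], 1: [2]}, 0): A returns {0: True}, B returns {0: True}
import Mathlib
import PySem

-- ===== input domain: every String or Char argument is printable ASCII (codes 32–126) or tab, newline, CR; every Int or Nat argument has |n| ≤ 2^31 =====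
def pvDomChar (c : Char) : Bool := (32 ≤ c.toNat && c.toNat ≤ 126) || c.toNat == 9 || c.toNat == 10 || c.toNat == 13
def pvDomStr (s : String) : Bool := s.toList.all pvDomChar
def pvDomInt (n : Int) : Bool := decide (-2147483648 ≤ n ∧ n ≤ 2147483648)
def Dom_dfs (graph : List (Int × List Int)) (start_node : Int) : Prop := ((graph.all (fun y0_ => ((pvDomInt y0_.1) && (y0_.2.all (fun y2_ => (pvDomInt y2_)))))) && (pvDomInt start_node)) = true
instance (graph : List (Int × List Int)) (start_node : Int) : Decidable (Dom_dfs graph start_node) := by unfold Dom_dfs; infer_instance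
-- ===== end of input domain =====

-- B replaces A's explicit worklist stack by genuine recursion on each node's neighbors
-- (in reversed order, matching A's LIFO pop order); objective: alternative, same cost.

-- ===== PORT A =====
-- graph[n]: first-match dict lookup; none = KeyError (excluded by Pre_dfs)
def pvLook (graph : List (Int × List Int)) (n : Int) : Option (List Int) :=
  (graph.find? (fun p => p.1 == n)).map (·.2)

-- 'node in visit': key membership in the visit dict
def pvVisited (visit : List (Int × Bool)) (n : Int) : Bool := visit.any (fun p => p.1 == n)

-- keys of the graph dict
def pvKeys (graph : List (Int × List Int)) : List Int := graph.map Prod.fst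

-- number of graph keys not yet in visit (termination measure only)
def pvUnvis (graph : List (Int × List Int)) (visit : List (Int × Bool)) : Nat :=
  (pvKeys graph).countP (fun k => !pvVisited visit k)

theorem pv_countP_strict {l : List Int} {p q : Int → Bool}
    (h : ∀ x ∈ l, q x = true → p x = true) {a : Int} (ha : a ∈ l)
    (hpa : p a = true) (hqa : q a = false) : l.countP q < l.countP p := by
  induction l with
  | nil => cases ha
  | cons b t ih =>
    rcases List.mem_cons.1 ha with rfl | hat
    · have hle : t.countP q ≤ t.countP p :=
        List.countP_mono_left (fun x hx => h x (List.mem_cons_of_mem _ hx))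
      simp [hpa, hqa]; omega
    · by_cases hb : q b = true
      · have hpb : p b = true := h b (List.mem_cons_self) hb
        have := ih (fun x hx => h x (List.mem_cons_of_mem _ hx)) hat
        simp [hb, hpb]; omega
      · have := ih (fun x hx => h x (List.mem_cons_of_mem _ hx)) hat
        simp [List.countP_cons, hb]
        rcases Bool.eq_false_or_eq_true (p b) with hpb | hpb <;> simp [hpb] <;> omega

theorem pv_unvis_lt (graph : List (Int × List Int)) (visit : List (Int × Bool)) {n : Int}
    {ns : List Int} (hl : pvLook graph n = some ns) (hv : pvVisited visit n = false) :
    pvUnvis graph (visit ++ [(n, true)]) < pvUnvis graph visit := by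
  unfold pvUnvis
  have hmem : n ∈ pvKeys graph := by
    unfold pvLook at hl
    rcases Option.map_eq_some_iff.1 hl with ⟨p, hp, -⟩
    have hpm := List.mem_of_find?_eq_some hp
    have hpe := List.find?_some hp
    have : p.1 = n := by simpa using hpe
    exact this ▸ List.mem_map_of_mem hpm
  apply pv_countP_strict (a := n) _ hmem (by simp [hv]) _
  · intro x _ hx
    simp only [pvVisited, List.any_append, Bool.not_eq_true', Bool.or_eq_false_iff] at hx ⊢
    exact hx.1
  · simp [pvVisited]

-- A: flat worklist; Python's list end (append/pop/extend) is encoded as the list HEAD,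
-- so 'stack.extend(graph[node])' then popping is 'ns.reverse ++ rest'.
def dfsLoop (graph : List (Int × List Int)) (visit : List (Int × Bool)) (stack : List Int) :
    List (Int × Bool) :=
  match stack with
  | [] => visit
  | n :: rest =>
    if hv : pvVisited visit n then dfsLoop graph visit rest
    else
      match hl : pvLook graph n with
      | none => visit ++ [(n, true)]   -- Python raises KeyError here (outside Pre_dfs)
      | some ns => dfsLoop graph (visit ++ [(n, true)]) (ns.reverse ++ rest)
  termination_by (pvUnvis graph visit, stack.length)
  decreasing_by
  · exact Prod.Lex.right _ (Nat.lt_succ_self _)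
  · exact Prod.Lex.left _ _ (pv_unvis_lt graph visit hl (by simpa using hv))

def dfs (graph : List (Int × List Int)) (start_node : Int) : List (Int × Bool) :=
  dfsLoop graph [] [start_node]

-- ===== PORT B =====
-- B: helper(node): if unseen, mark node then recurse on reversed(graph[node]).
-- fuel is a termination bound only: each level that recurses has just marked a fresh
-- graph key, so fuel = graph.length + 1 is proven sufficient (pv_rec_eq_loop below).
def dfsRec (graph : List (Int × List Int)) (fuel : Nat) (visit : List (Int × Bool))
    (node : Int) : List (Int × Bool) :=
  match fuel with
  | 0 => visit   -- unreachable when fuel > pvUnvis graph visit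
  | f + 1 =>
    if pvVisited visit node then visit
    else
      match pvLook graph node with
      | none => visit ++ [(node, true)]   -- Python raises KeyError here (outside Pre_dfs)
      | some ns => ns.reverse.foldl (fun v m => dfsRec graph f v m) (visit ++ [(node, true)])

def dfs_alt (graph : List (Int × List Int)) (start_node : Int) : List (Int × Bool) :=
  dfsRec graph (graph.length + 1) [] start_node

-- ===== PRECONDITION & SPEC =====
-- Pre_dfs requires start_node and every listed neighbor to be keys of graph, so that no
-- KeyError can occur; this also excludes some graphs where a missing neighbor is
-- unreachable and A still returns (see claim cites).
def Pre_dfs (graph : List (Int × List Int)) (start_node : Int) : Prop :=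
  (pvKeys graph).contains start_node = true ∧
    ∀ p ∈ graph, ∀ m ∈ p.2, (pvKeys graph).contains m = true
instance (graph : List (Int × List Int)) (start_node : Int) : Decidable (Pre_dfs graph start_node) := by
  unfold Pre_dfs; infer_instance

def pvWitness_dfs : (List (Int × List Int)) × Int := ([(0, [1]), (1, [0, 1])], 0)

def Spec_dfs (graph : List (Int × List Int)) (start_node : Int) (out : List (Int × Bool)) : Prop := out = dfs_alt graph start_node
instance (graph : List (Int × List Int)) (start_node : Int) (out : List (Int × Bool)) : Decidable (Spec_dfs graph start_node out) := by unfold Spec_dfs; infer_instance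

-- ===== CLAIM (what is proved, stated in full; the proofs are below) =====
def Claim_equal_dfs : Prop := ∀ (graph : List (Int × List Int)) (start_node : Int), Dom_dfs graph start_node → Pre_dfs graph start_node → Spec_dfs graph start_node (dfs graph start_node)

-- ===== LEMMAS AND PROOFS =====
-- unfolding lemmas for the well-founded loop
theorem dfsLoop_nil (graph : List (Int × List Int)) (v : List (Int × Bool)) :
    dfsLoop graph v [] = v := by rw [dfsLoop]

theorem dfsLoop_cons_visited (graph : List (Int × List Int)) (v : List (Int × Bool))
    (n : Int) (rest : List Int) (hv : pvVisited v n = true) :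
    dfsLoop graph v (n :: rest) = dfsLoop graph v rest := by
  rw [dfsLoop, dif_pos hv]

theorem dfsLoop_cons_none (graph : List (Int × List Int)) (v : List (Int × Bool))
    (n : Int) (rest : List Int) (hv : pvVisited v n = false)
    (hk : pvLook graph n = none) :
    dfsLoop graph v (n :: rest) = v ++ [(n, true)] := by
  rw [dfsLoop, dif_neg (by simp [hv])]
  split
  · rfl
  · rename_i ns hl; rw [hk] at hl; cases hl

theorem dfsLoop_cons_step (graph : List (Int × List Int)) (v : List (Int × Bool))
    (n : Int) (rest : List Int) (ns : List Int) (hv : pvVisited v n = false)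
    (hk : pvLook graph n = some ns) :
    dfsLoop graph v (n :: rest) = dfsLoop graph (v ++ [(n, true)]) (ns.reverse ++ rest) := by
  rw [dfsLoop, dif_neg (by simp [hv])]
  split
  · rename_i hl; rw [hk] at hl; cases hl
  · rename_i ns' hl; rw [hk] at hl; cases hl; rfl

-- a graph key always has a neighbor list
theorem pv_look_of_key {graph : List (Int × List Int)} {k : Int}
    (h : (pvKeys graph).contains k = true) : ∃ ns, pvLook graph k = some ns := by
  have hk : k ∈ pvKeys graph := by simpa using h
  rcases List.mem_map.1 hk with ⟨p, hp, hpk⟩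
  have : (graph.find? (fun q => q.1 == k)).isSome := by
    rw [List.find?_isSome]
    exact ⟨p, hp, by simp [hpk]⟩
  rcases Option.isSome_iff_exists.1 this with ⟨q, hq⟩
  exact ⟨q.2, by simp [pvLook, hq]⟩

-- neighbors of a key are keys (under the closure hypothesis)
theorem pv_neighbors_keys {graph : List (Int × List Int)} {n : Int} {ns : List Int}
    (hCl : ∀ p ∈ graph, ∀ m ∈ p.2, (pvKeys graph).contains m = true)
    (hl : pvLook graph n = some ns) : ∀ m ∈ ns, (pvKeys graph).contains m = true := by
  unfold pvLook at hl
  rcases Option.map_eq_some_iff.1 hl with ⟨p, hp, hp2⟩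
  exact hp2 ▸ hCl p (List.mem_of_find?_eq_some hp)

-- growing the visit dict never increases the unvisited count
theorem pv_unvis_append_le (graph : List (Int × List Int)) (v w : List (Int × Bool)) :
    pvUnvis graph (v ++ w) ≤ pvUnvis graph v := by
  apply List.countP_mono_left
  intro x _ hx
  simp only [pvVisited, List.any_append, Bool.not_eq_true', Bool.or_eq_false_iff] at hx ⊢
  exact hx.1

theorem pv_loop_unvis_le (graph : List (Int × List Int)) (visit : List (Int × Bool))
    (stack : List Int) : pvUnvis graph (dfsLoop graph visit stack) ≤ pvUnvis graph visit := by
  fun_induction dfsLoop graph visit stack with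
  | case1 visit => exact le_rfl
  | case2 visit n rest hv ih => exact ih
  | case3 visit n rest hv hl => exact pv_unvis_append_le graph visit _
  | case4 visit n rest hv ns hl ih =>
    exact le_trans ih (pv_unvis_append_le graph visit _)

-- the flat stack splits: processing l ++ rest = processing l, then rest (no KeyError in l)
theorem pv_loop_append (graph : List (Int × List Int))
    (hCl : ∀ p ∈ graph, ∀ m ∈ p.2, (pvKeys graph).contains m = true)
    (visit : List (Int × Bool)) (l rest : List Int)
    (hl : ∀ x ∈ l, (pvKeys graph).contains x = true) :
    dfsLoop graph visit (l ++ rest) = dfsLoop graph (dfsLoop graph visit l) rest := by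
  fun_induction dfsLoop graph visit l with
  | case1 visit => rfl
  | case2 visit n tl hv ih =>
    rw [List.cons_append, dfsLoop_cons_visited graph visit n (tl ++ rest) hv]
    exact ih (fun x hx => hl x (List.mem_cons_of_mem _ hx))
  | case3 visit n tl hv hk =>
    rcases pv_look_of_key (hl n List.mem_cons_self) with ⟨ns, hns⟩
    rw [hk] at hns; cases hns
  | case4 visit n tl hv ns hk ih =>
    rw [List.cons_append,
      dfsLoop_cons_step graph visit n (tl ++ rest) ns (by simpa using hv) hk,
      ← List.append_assoc]
    refine ih ?_
    intro x hx
    rcases List.mem_append.1 hx with hx | hx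
    · exact pv_neighbors_keys hCl hk x (List.mem_reverse.1 hx)
    · exact hl x (List.mem_cons_of_mem _ hx)

-- with fuel exceeding the unvisited count, the recursion equals A's loop on one node
theorem pv_rec_eq_loop (graph : List (Int × List Int))
    (hCl : ∀ p ∈ graph, ∀ m ∈ p.2, (pvKeys graph).contains m = true) :
    ∀ (f : Nat) (v : List (Int × Bool)) (m : Int), pvUnvis graph v < f →
      dfsRec graph f v m = dfsLoop graph v [m] := by
  intro f
  induction f with
  | zero => intro v m h; omega
  | succ f ih =>
    intro v m h
    have fold : ∀ (l : List Int) (v' : List (Int × Bool)),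
        (∀ x ∈ l, (pvKeys graph).contains x = true) → pvUnvis graph v' < f →
        l.foldl (fun v m => dfsRec graph f v m) v' = dfsLoop graph v' l := by
      intro l
      induction l with
      | nil => intro v' _ _; rw [List.foldl_nil, dfsLoop_nil]
      | cons y ys ihl =>
        intro v' hkeys hf
        have h1 : dfsRec graph f v' y = dfsLoop graph v' [y] := ih v' y hf
        have h2 : pvUnvis graph (dfsLoop graph v' [y]) < f :=
          lt_of_le_of_lt (pv_loop_unvis_le graph v' [y]) hf
        calc (y :: ys).foldl (fun v m => dfsRec graph f v m) v'
            = ys.foldl (fun v m => dfsRec graph f v m) (dfsLoop graph v' [y]) := by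
              rw [List.foldl_cons, h1]
          _ = dfsLoop graph (dfsLoop graph v' [y]) ys :=
              ihl _ (fun z hz => hkeys z (List.mem_cons_of_mem _ hz)) h2
          _ = dfsLoop graph v' (y :: ys) := by
              have := pv_loop_append graph hCl v' [y] ys
                (by intro z hz
                    rw [List.mem_singleton] at hz
                    rw [hz]
                    exact hkeys y List.mem_cons_self)
              rw [List.singleton_append] at this
              exact this.symm
    by_cases hv : pvVisited v m
    · rw [dfsRec]
      simp only [hv, if_true]
      rw [dfsLoop_cons_visited graph v m [] hv, dfsLoop_nil]
    · have hv' : pvVisited v m = false := by simpa using hv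
      match hk : pvLook graph m with
      | none =>
        rw [dfsRec]
        simp only [hv', hk, Bool.false_eq_true, if_false]
        rw [dfsLoop_cons_none graph v m [] hv' hk]
      | some ns =>
        have hlt : pvUnvis graph (v ++ [(m, true)]) < f := by
          have := pv_unvis_lt graph v hk hv'
          omega
        rw [dfsRec]
        simp only [hv', hk, Bool.false_eq_true, if_false]
        rw [fold ns.reverse (v ++ [(m, true)])
            (fun x hx => pv_neighbors_keys hCl hk x (List.mem_reverse.1 hx)) hlt]
        rw [dfsLoop_cons_step graph v m [] ns hv' hk, List.append_nil]

theorem pv_unvis_nil_le (graph : List (Int × List Int)) :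
    pvUnvis graph [] ≤ graph.length := by
  calc pvUnvis graph [] ≤ (pvKeys graph).length := List.countP_le_length
    _ = graph.length := List.length_map _

-- ===== VERDICT (by name: the statement is the Claim_ definition above) =====
theorem dfs_spec : Claim_equal_dfs := by
  intro graph start_node _ hpre
  unfold Spec_dfs dfs dfs_alt
  rw [pv_rec_eq_loop graph hpre.2 (graph.length + 1) [] start_node
    (lt_of_le_of_lt (pv_unvis_nil_le graph) (Nat.lt_succ_self _))]
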